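-- pv_equiv track=rewrite | github.com/rkihonge/ISO_27001-Gap-analysis | gap_analysis.py | compare_controls
-- ===== SOURCE A (Python) =====
-- def compare_controls(iso_controls, current_state):
--     implemented = []
--     missing = []
--     partial = []
--
--     for control, description in iso_controls.items():
--         if control in current_state:
--             if current_state[control] == "implemented":
--                 implemented.append(f"{control}: {description}")
--             elif current_state[control] == "partial":
--                 partial.append(f"{control}: {description}")
--             else:
--                 missing.append(f"{control}: {description}")
--         else:
--             missing.append(f"{control}: {description}")
--
--     return implemented, partial, missing
-- ===== SOURCE B (Python) =====
-- def compare_controls(iso_controls, current_state):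
--     items = iso_controls.items()
--     implemented = [f"{c}: {d}" for c, d in items
--                    if current_state.get(c) == "implemented"]
--     partial = [f"{c}: {d}" for c, d in items
--                if current_state.get(c) == "partial"]
--     missing = [f"{c}: {d}" for c, d in items
--                if current_state.get(c) not in ("implemented", "partial")]
--     return implemented, partial, missing
-- ===== Notes on version B (the rewrite author's own statement) =====
-- stated objective: idiomatic
-- what changed: Replaces the single branching pass with three independent selecting comprehensions (one per output list), each classifying via current_state.get(control); the missing list uses the single predicate status not in ('implemented','partial') covering both absent keys and other statuses.
import Mathlib
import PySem

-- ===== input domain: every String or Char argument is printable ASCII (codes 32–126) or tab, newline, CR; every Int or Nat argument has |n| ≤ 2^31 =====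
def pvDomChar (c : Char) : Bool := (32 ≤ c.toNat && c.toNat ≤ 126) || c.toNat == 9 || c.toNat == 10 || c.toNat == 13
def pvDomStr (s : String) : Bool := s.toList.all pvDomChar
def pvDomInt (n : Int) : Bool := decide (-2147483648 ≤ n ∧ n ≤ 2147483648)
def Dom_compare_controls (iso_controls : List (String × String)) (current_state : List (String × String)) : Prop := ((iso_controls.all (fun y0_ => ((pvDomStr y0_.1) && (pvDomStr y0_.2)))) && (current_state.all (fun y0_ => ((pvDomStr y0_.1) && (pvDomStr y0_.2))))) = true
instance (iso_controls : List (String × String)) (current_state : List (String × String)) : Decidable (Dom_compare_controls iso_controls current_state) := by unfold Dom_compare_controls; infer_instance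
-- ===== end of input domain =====

-- ===== PORT A =====
-- One pass over iso_controls.items(): an if/elif/else chain appends each entry to one of three accumulators.
def compare_controls (iso_controls : List (String × String)) (current_state : List (String × String)) : List String × List String × List String :=
  let cs := PySem.Dict.ofList current_state
  let r := (PySem.Dict.ofList iso_controls).items.foldl
    (fun (acc : List String × List String × List String) p =>
      let control := p.1
      let description := p.2
      let entry := control ++ ": " ++ description
      if cs.contains control then
        match cs.get? control with
        | some v =>
          if v = "implemented" then (acc.1 ++ [entry], acc.2.1, acc.2.2)
          else if v = "partial" then (acc.1, acc.2.1 ++ [entry], acc.2.2)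
          else (acc.1, acc.2.1, acc.2.2 ++ [entry])
        | none => (acc.1, acc.2.1, acc.2.2 ++ [entry])   -- unreachable: guarded by contains
      else (acc.1, acc.2.1, acc.2.2 ++ [entry]))
    ([], [], [])
  r

-- ===== PORT B =====
-- Three independent selecting passes (list comprehensions), one per output list; classification via current_state.get(control).
def compare_controls_alt (iso_controls : List (String × String)) (current_state : List (String × String)) : List String × List String × List String :=
  let items := (PySem.Dict.ofList iso_controls).items
  let cs := PySem.Dict.ofList current_state
  (items.filterMap (fun p => if cs.get? p.1 = some "implemented" then some (p.1 ++ ": " ++ p.2) else none),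
   items.filterMap (fun p => if cs.get? p.1 = some "partial" then some (p.1 ++ ": " ++ p.2) else none),
   items.filterMap (fun p => if cs.get? p.1 ≠ some "implemented" ∧ cs.get? p.1 ≠ some "partial" then some (p.1 ++ ": " ++ p.2) else none))

-- ===== PRECONDITION & SPEC =====
def Spec_compare_controls (iso_controls : List (String × String)) (current_state : List (String × String)) (out : List String × List String × List String) : Prop := out = compare_controls_alt iso_controls current_state
instance (iso_controls : List (String × String)) (current_state : List (String × String)) (out : List String × List String × List String) : Decidable (Spec_compare_controls iso_controls current_state out) := by unfold Spec_compare_controls; infer_instance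

-- ===== CLAIM (what is proved, stated in full; the proofs are below) =====
def Claim_equal_compare_controls : Prop := ∀ (iso_controls : List (String × String)) (current_state : List (String × String)), Dom_compare_controls iso_controls current_state → Spec_compare_controls iso_controls current_state (compare_controls iso_controls current_state)

-- ===== LEMMAS AND PROOFS =====
theorem fold_eq (cs : PySem.Dict String String) (l : List (String × String))
    (acc : List String × List String × List String) :
    l.foldl
      (fun (acc : List String × List String × List String) p =>
        let control := p.1
        let description := p.2
        let entry := control ++ ": " ++ description
        if cs.contains control then
          match cs.get? control with
          | some v =>
            if v = "implemented" then (acc.1 ++ [entry], acc.2.1, acc.2.2)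
            else if v = "partial" then (acc.1, acc.2.1 ++ [entry], acc.2.2)
            else (acc.1, acc.2.1, acc.2.2 ++ [entry])
          | none => (acc.1, acc.2.1, acc.2.2 ++ [entry])
        else (acc.1, acc.2.1, acc.2.2 ++ [entry])) acc
    = (acc.1 ++ l.filterMap (fun p => if cs.get? p.1 = some "implemented" then some (p.1 ++ ": " ++ p.2) else none),
       acc.2.1 ++ l.filterMap (fun p => if cs.get? p.1 = some "partial" then some (p.1 ++ ": " ++ p.2) else none),
       acc.2.2 ++ l.filterMap (fun p => if cs.get? p.1 ≠ some "implemented" ∧ cs.get? p.1 ≠ some "partial" then some (p.1 ++ ": " ++ p.2) else none)) := by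
  induction l generalizing acc with
  | nil => simp
  | cons p rest ih =>
    simp only [List.foldl_cons, List.filterMap_cons]
    have hc : cs.contains p.1 = (cs.get? p.1).isSome := by
      simp [PySem.Dict.contains_eq_isSome_get?]
    by_cases h : ∃ v, cs.get? p.1 = some v
    · obtain ⟨v, hv⟩ := h
      rw [ih]
      by_cases h1 : v = "implemented"
      · simp [hc, hv, h1]
      · by_cases h2 : v = "partial"
        · simp [hc, hv, h2]
        · simp [hc, hv, h1, h2]
    · have hv : cs.get? p.1 = none := by
        cases hx : cs.get? p.1 with
        | none => rfl
        | some v => exact absurd ⟨v, hx⟩ h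
      rw [ih]
      simp [hc, hv]

-- ===== VERDICT (by name: the statement is the Claim_ definition above) =====
theorem compare_controls_spec : Claim_equal_compare_controls := by
  intro iso cs _
  unfold Spec_compare_controls compare_controls compare_controls_alt
  simp only []
  rw [fold_eq]
  simp
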